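-- pv_equiv track=rewrite | github.com/manabcodes/bpmn2odrl | previous-iterations/bpmn2odrl6.py | _bfs_reachable
-- ===== SOURCE A (Python) =====
-- from collections import defaultdict, deque
-- from typing import Dict, List, Optional, Set, Tuple
--
-- def _bfs_reachable(start: str,
--                    succ:  Dict[str, List[str]],
--                    exclude: Optional[str] = None) -> Set[str]:
--     """
--     BFS from start, optionally excluding one node.
--     Returns the set of all reachable nodes.
--     """
--     visited: Set[str] = set()
--     q = deque([start])
--     while q:
--         v = q.popleft()
--         if v in visited or v == exclude:
--             continue
--         visited.add(v)
--         for w in succ.get(v, []):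
--             if w != exclude:
--                 q.append(w)
--     return visited
-- ===== SOURCE B (Python) =====
-- from typing import Dict, List, Optional, Set
--
--
-- def _bfs_reachable(start: str,
--                    succ:  Dict[str, List[str]],
--                    exclude: Optional[str] = None) -> Set[str]:
--     """Level-synchronized frontier BFS: expand a whole frontier per step
--     with set algebra instead of a node-by-node queue."""
--     visited: Set[str] = set()
--     frontier = [start] if start != exclude else []
--     while frontier:
--         visited.update(frontier)
--         frontier = list(dict.fromkeys(
--             w for v in frontier for w in succ.get(v, [])
--             if w != exclude and w not in visited))
--     return visited
-- ===== Notes on version B (the rewrite author's own statement) =====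
-- stated objective: alternative
-- what changed: Replaced the node-by-node FIFO queue with pop-time visited checks by a level-synchronized frontier BFS: each iteration absorbs a whole frontier into visited and builds the next frontier with an ordered-dedup set comprehension, so there is no queue and no per-pop membership test.
import Mathlib
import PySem

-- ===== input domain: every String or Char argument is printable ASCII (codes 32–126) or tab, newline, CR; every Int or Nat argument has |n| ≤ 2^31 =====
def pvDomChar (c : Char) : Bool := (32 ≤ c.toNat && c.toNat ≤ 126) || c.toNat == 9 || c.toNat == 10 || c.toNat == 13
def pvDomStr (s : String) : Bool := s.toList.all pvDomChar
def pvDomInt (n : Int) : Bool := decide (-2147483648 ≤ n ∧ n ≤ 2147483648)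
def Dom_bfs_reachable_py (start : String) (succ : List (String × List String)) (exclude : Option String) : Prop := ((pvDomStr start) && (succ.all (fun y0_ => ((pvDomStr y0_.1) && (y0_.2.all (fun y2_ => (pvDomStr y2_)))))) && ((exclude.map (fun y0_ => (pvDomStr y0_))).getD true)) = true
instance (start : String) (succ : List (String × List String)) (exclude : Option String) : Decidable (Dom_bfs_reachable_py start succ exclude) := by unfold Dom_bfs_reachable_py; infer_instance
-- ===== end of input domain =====

-- B replaces A's node-by-node FIFO queue (pop, skip-if-visited, push children) by a
-- level-synchronized frontier BFS (absorb the whole frontier, rebuild it by an ordered-dedup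
-- comprehension); proved to return the identical list.

-- ===== PORT A =====
-- succ.get(v, [])  (both Pythons call this identically)
def pvSuccGet (succ : List (String × List String)) (v : String) : List String :=
  PySem.Dict.getD ⟨succ⟩ v []

-- finite universe of every node that can ever be enqueued; used only as a termination measure
def pvU (start : String) (succ : List (String × List String)) : List String :=
  start :: succ.flatMap (fun p => p.2)

lemma pvSuccGet_mem_pvU (start : String) (succ : List (String × List String)) (v x : String)
    (hx : x ∈ pvSuccGet succ v) : x ∈ pvU start succ := by
  unfold pvSuccGet at hx
  simp only [PySem.Dict.getD, PySem.Dict.get?] at hx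
  cases hfind : List.find? (fun p => p.1 == v) (PySem.Dict.mk succ).items with
  | none => rw [hfind] at hx; simp at hx
  | some pr =>
    rw [hfind] at hx
    simp only [Option.map_some, Option.getD_some] at hx
    have hm : pr ∈ succ := List.mem_of_find?_eq_some hfind
    exact List.mem_cons_of_mem _ (List.mem_flatMap.mpr ⟨pr, hm, hx⟩)

lemma pvContains_iff (s : PySem.Set String) (x : String) : s.contains x = true ↔ x ∈ s := by
  simp [PySem.Set.contains]

lemma pvMem_update (l : List String) (s : PySem.Set String) (y : String) :
    y ∈ PySem.Set.update s l ↔ y ∈ s ∨ y ∈ l := by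
  induction l generalizing s with
  | nil => simp [PySem.Set.update]
  | cons x l ih =>
    show y ∈ PySem.Set.update (s.add x) l ↔ _
    rw [ih]
    simp [PySem.Set.mem_add]
    tauto

lemma pvFilterLenLt {α : Type} (p q : α → Bool) (U : List α)
    (himp : ∀ x, q x = true → p x = true) (v : α) (hv : v ∈ U)
    (hp : p v = true) (hqv : q v = false) :
    (U.filter q).length < (U.filter p).length := by
  induction U with
  | nil => cases hv
  | cons a U ih =>
    have hle : (U.filter q).length ≤ (U.filter p).length := by
      rw [← List.countP_eq_length_filter, ← List.countP_eq_length_filter]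
      exact List.countP_mono_left (fun x _ => himp x)
    rcases List.mem_cons.mp hv with rfl | hv'
    · simp [hp, hqv]; omega
    · have hlt := ih hv'
      cases hqa : q a with
      | true => have hpa := himp a hqa; simp [hqa, hpa]; omega
      | false => cases hpa : p a <;> simp [hqa, hpa] <;> omega

-- transliteration of A: pop v from the queue front, skip if visited or excluded,
-- else add to visited and append its non-excluded successors
def pvLoopA (succ : List (String × List String)) (exclude : Option String) (U : List String)
    (hU : ∀ v x, x ∈ pvSuccGet succ v → x ∈ U) (visited : PySem.Set String) (q : List String)
    (hq : ∀ x ∈ q, x ∈ U) : PySem.Set String :=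
  match q with
  | [] => visited
  | v :: rest =>
    if h : visited.contains v || (some v == exclude) then
      pvLoopA succ exclude U hU visited rest (fun x hx => hq x (List.mem_cons_of_mem _ hx))
    else
      pvLoopA succ exclude U hU (visited.add v)
        (rest ++ (pvSuccGet succ v).filter (fun w => !(some w == exclude)))
        (fun x hx => (List.mem_append.mp hx).elim
          (fun h1 => hq x (List.mem_cons_of_mem _ h1))
          (fun h2 => hU v x (List.mem_of_mem_filter h2)))
  termination_by ((U.filter (fun x => !visited.contains x)).length, q.length)
  decreasing_by
  · exact Prod.Lex.right _ (Nat.lt_succ_self _)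
  · apply Prod.Lex.left
    have hnc : visited.contains v = false := by
      cases hc : visited.contains v
      · rfl
      · exact absurd (by rw [hc, Bool.true_or]) h
    refine pvFilterLenLt _ _ U ?_ v (hq v List.mem_cons_self) ?_ ?_
    · intro x hx
      cases hcx : visited.contains x
      · rfl
      · exfalso
        have hmem : x ∈ visited.add v :=
          (PySem.Set.mem_add _ _ _).mpr (Or.inl ((pvContains_iff _ _).mp hcx))
        rw [(pvContains_iff _ _).mpr hmem] at hx
        simp at hx
    · rw [hnc]; rfl
    · have hmem : v ∈ visited.add v := (PySem.Set.mem_add _ _ _).mpr (Or.inr rfl)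
      rw [(pvContains_iff _ _).mpr hmem]; rfl

def bfs_reachable_py (start : String) (succ : List (String × List String)) (exclude : Option String) : List String :=
  pvLoopA succ exclude (pvU start succ) (fun v x hx => pvSuccGet_mem_pvU start succ v x hx)
    PySem.Set.empty [start]
    (fun x hx => by
      have hxs : x = start := by simpa using hx
      subst hxs; exact List.mem_cons_self)

-- ===== PORT B =====
-- transliteration of B: absorb the whole frontier into visited, rebuild the frontier as the
-- ordered dedup (dict.fromkeys) of the filtered successor comprehension
def pvLoopB (succ : List (String × List String)) (exclude : Option String) (U : List String)
    (hU : ∀ v x, x ∈ pvSuccGet succ v → x ∈ U) (visited : PySem.Set String) (frontier : List String)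
    (hf : ∀ x ∈ frontier, x ∈ U ∧ visited.contains x = false) : PySem.Set String :=
  match frontier with
  | [] => visited
  | v :: rest =>
    pvLoopB succ exclude U hU (PySem.Set.update visited (v :: rest))
      (PySem.List.dedup ((v :: rest).flatMap (fun u => (pvSuccGet succ u).filter
        (fun w => !(some w == exclude) && !(PySem.Set.update visited (v :: rest)).contains w))))
      (fun x hx => by
        have hx' := (PySem.List.mem_dedup _ _).mp hx
        rcases List.mem_flatMap.mp hx' with ⟨u, hu, hxf⟩
        rcases List.mem_filter.mp hxf with ⟨hxs, hpred⟩
        refine ⟨hU u x hxs, ?_⟩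
        cases hc : (PySem.Set.update visited (v :: rest)).contains x
        · rfl
        · rw [hc] at hpred; simp at hpred)
  termination_by (U.filter (fun x => !visited.contains x)).length
  decreasing_by
    have hv := hf v List.mem_cons_self
    refine pvFilterLenLt _ _ U ?_ v hv.1 ?_ ?_
    · intro x hx
      cases hcx : visited.contains x
      · rfl
      · exfalso
        have hmem : x ∈ PySem.Set.update visited (v :: rest) :=
          (pvMem_update _ _ _).mpr (Or.inl ((pvContains_iff _ _).mp hcx))
        rw [(pvContains_iff _ _).mpr hmem] at hx
        simp at hx
    · rw [hv.2]; rfl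
    · have hmem : v ∈ PySem.Set.update visited (v :: rest) :=
        (pvMem_update _ _ _).mpr (Or.inr List.mem_cons_self)
      rw [(pvContains_iff _ _).mpr hmem]; rfl

def bfs_reachable_py_alt (start : String) (succ : List (String × List String)) (exclude : Option String) : List String :=
  pvLoopB succ exclude (pvU start succ) (fun v x hx => pvSuccGet_mem_pvU start succ v x hx)
    PySem.Set.empty (if some start == exclude then [] else [start])
    (fun x hx => by
      by_cases hse : (some start == exclude) = true
      · rw [if_pos hse] at hx; cases hx
      · rw [if_neg hse] at hx
        have hxs : x = start := by simpa using hx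
        subst hxs
        exact ⟨List.mem_cons_self, rfl⟩)

-- ===== PRECONDITION & SPEC =====
def Spec_bfs_reachable_py (start : String) (succ : List (String × List String)) (exclude : Option String) (out : List String) : Prop := out = bfs_reachable_py_alt start succ exclude
instance (start : String) (succ : List (String × List String)) (exclude : Option String) (out : List String) : Decidable (Spec_bfs_reachable_py start succ exclude out) := by unfold Spec_bfs_reachable_py; infer_instance

-- ===== CLAIM (what is proved, stated in full; the proofs are below) =====
def Claim_equal_bfs_reachable_py : Prop := ∀ (start : String) (succ : List (String × List String)) (exclude : Option String), Dom_bfs_reachable_py start succ exclude → Spec_bfs_reachable_py start succ exclude (bfs_reachable_py start succ exclude)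

-- ===== LEMMAS AND PROOFS =====

-- first-occurrence selection of elements not yet in s (the common order both loops produce)
def pvFresh (s : PySem.Set String) : List String → List String
  | [] => []
  | x :: l => if s.contains x then pvFresh s l else x :: pvFresh (s.add x) l

-- the frontier predicate of B's comprehension
def pvP (exclude : Option String) (V : PySem.Set String) (w : String) : Bool :=
  !(some w == exclude) && !V.contains w

-- the canonical "next new nodes" of a queue segment
def pvN (exclude : Option String) (V : PySem.Set String) (q : List String) : List String :=
  pvFresh PySem.Set.empty (q.filter (pvP exclude V))

-- concatenated (exclusion-filtered) successor lists of a frontier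
def pvChain (succ : List (String × List String)) (exclude : Option String) (F : List String) : List String :=
  F.flatMap (fun v => (pvSuccGet succ v).filter (fun w => !(some w == exclude)))

lemma pvFresh_congr (l : List String) : ∀ (s t : PySem.Set String),
    (∀ x, x ∈ s ↔ x ∈ t) → pvFresh s l = pvFresh t l := by
  induction l with
  | nil => intro s t _; rfl
  | cons x l ih =>
    intro s t h
    have hc : s.contains x = t.contains x :=
      Bool.eq_iff_iff.mpr (by rw [pvContains_iff, pvContains_iff]; exact h x)
    simp only [pvFresh, hc]
    cases ht : t.contains x
    · simp only [Bool.false_eq_true, if_false]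
      congr 1
      exact ih _ _ (fun y => by
        rw [PySem.Set.mem_add, PySem.Set.mem_add]
        exact or_congr (h y) Iff.rfl)
    · simp only [if_true]
      exact ih _ _ h

lemma pvFresh_mem (l : List String) : ∀ (s : PySem.Set String) (x : String),
    x ∈ pvFresh s l → x ∈ l ∧ x ∉ s := by
  induction l with
  | nil => intro s x hx; cases hx
  | cons a l ih =>
    intro s x hx
    simp only [pvFresh] at hx
    cases hc : s.contains a
    · rw [hc] at hx
      simp only [Bool.false_eq_true, if_false] at hx
      rcases List.mem_cons.mp hx with rfl | hx'
      · refine ⟨List.mem_cons_self, fun hm => ?_⟩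
        rw [(pvContains_iff _ _).mpr hm] at hc
        exact Bool.noConfusion hc
      · have := ih _ _ hx'
        refine ⟨List.mem_cons_of_mem _ this.1, fun hm => this.2 ?_⟩
        exact (PySem.Set.mem_add _ _ _).mpr (Or.inl hm)
    · rw [hc] at hx
      simp only [if_true] at hx
      have := ih _ _ hx
      exact ⟨List.mem_cons_of_mem _ this.1, this.2⟩

lemma pvFresh_filter_skip (l : List String) : ∀ (s : PySem.Set String) (v : String), v ∈ s →
    pvFresh s l = pvFresh s (l.filter (fun x => !(x == v))) := by
  induction l with
  | nil => intro s v _; rfl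
  | cons x l ih =>
    intro s v hv
    by_cases hxv : x = v
    · subst hxv
      have hc : s.contains x = true := (pvContains_iff _ _).mpr hv
      simp only [pvFresh, hc, if_true, List.filter_cons, beq_self_eq_true, Bool.not_true,
        Bool.false_eq_true, if_false]
      exact ih s x hv
    · have hbx : (x == v) = false := beq_eq_false_iff_ne.mpr hxv
      simp only [pvFresh, List.filter_cons, hbx, Bool.not_false, if_true]
      cases hc : s.contains x
      · simp only [pvFresh, Bool.false_eq_true, if_false]
        congr 1
        exact ih _ v ((PySem.Set.mem_add _ _ _).mpr (Or.inl hv))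
      · simp only [pvFresh, if_true]
        exact ih s v hv

lemma pvFresh_add_notmem (l : List String) : ∀ (s : PySem.Set String) (v : String), v ∉ l →
    pvFresh (s.add v) l = pvFresh s l := by
  induction l with
  | nil => intro s v _; rfl
  | cons x l ih =>
    intro s v hv
    have hxv : x ≠ v := fun h => hv (h ▸ List.mem_cons_self)
    have hvl : v ∉ l := fun h => hv (List.mem_cons_of_mem _ h)
    have hc : (s.add v).contains x = s.contains x :=
      Bool.eq_iff_iff.mpr (by
        rw [pvContains_iff, pvContains_iff, PySem.Set.mem_add]
        exact ⟨fun h => h.elim id (fun h' => absurd h' hxv), Or.inl⟩)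
    simp only [pvFresh, hc]
    cases hcx : s.contains x
    · simp only [Bool.false_eq_true, if_false]
      congr 1
      calc pvFresh ((s.add v).add x) l
          = pvFresh ((s.add x).add v) l := pvFresh_congr l _ _ (fun y => by
            rw [PySem.Set.mem_add, PySem.Set.mem_add, PySem.Set.mem_add, PySem.Set.mem_add]
            tauto)
        _ = pvFresh (s.add x) l := ih _ v hvl
    · simp only [if_true]
      exact ih s v hvl

lemma pvUpdate_eq_append (l : List String) : ∀ (s : PySem.Set String),
    PySem.Set.update s l = s ++ pvFresh s l := by
  induction l with
  | nil => intro s; simp [PySem.Set.update, pvFresh]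
  | cons x l ih =>
    intro s
    show PySem.Set.update (s.add x) l = _
    rw [ih]
    cases hc : s.contains x
    · have hadd : s.add x = s ++ [x] := by unfold PySem.Set.add; rw [hc]; simp
      simp only [pvFresh, hc, Bool.false_eq_true, if_false]
      rw [hadd, List.append_assoc]
      rfl
    · have hadd : s.add x = s := by unfold PySem.Set.add; rw [hc]; simp
      simp only [pvFresh, hc, if_true]
      rw [hadd]

lemma pvDedup_eq_fresh (l : List String) : PySem.List.dedup l = pvFresh PySem.Set.empty l := by
  have h := pvUpdate_eq_append l PySem.Set.empty
  simp only [PySem.Set.update, PySem.Set.empty, List.nil_append] at h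
  rw [show PySem.List.dedup l = PySem.Set.ofList l from rfl, PySem.Set.ofList_eq_foldl]
  exact h

lemma pvP_add (exclude : Option String) (V : PySem.Set String) (v w : String) :
    pvP exclude (V.add v) w = (pvP exclude V w && !(w == v)) := by
  have hc : (V.add v).contains w = (V.contains w || w == v) :=
    Bool.eq_iff_iff.mpr (by
      rw [pvContains_iff, PySem.Set.mem_add, Bool.or_eq_true, pvContains_iff, beq_iff_eq])
  unfold pvP
  rw [hc]
  cases (some w == exclude) <;> cases V.contains w <;> cases (w == v) <;> simp

lemma pvN_cons_skip (exclude : Option String) (V : PySem.Set String) (v : String) (q : List String)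
    (h : pvP exclude V v = false) : pvN exclude V (v :: q) = pvN exclude V q := by
  unfold pvN
  rw [List.filter_cons, h]
  simp

lemma pvN_cons_add (exclude : Option String) (V : PySem.Set String) (v : String) (q : List String)
    (h : pvP exclude V v = true) : pvN exclude V (v :: q) = v :: pvN exclude (V.add v) q := by
  unfold pvN
  rw [List.filter_cons, h]
  simp only [if_true]
  have hce : (PySem.Set.empty : PySem.Set String).contains v = false := rfl
  have hadd : (PySem.Set.empty : PySem.Set String).add v = [v] := by
    simp [PySem.Set.add, PySem.Set.empty, PySem.Set.contains]
  simp only [pvFresh, hce, Bool.false_eq_true, if_false]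
  congr 1
  rw [hadd]
  have hv1 : v ∈ ([v] : PySem.Set String) := List.mem_cons_self
  rw [pvFresh_filter_skip _ _ v hv1, List.filter_filter]
  have hfe : (List.filter (fun x => !(x == v) && pvP exclude V x) q)
      = List.filter (pvP exclude (V.add v)) q := by
    apply List.filter_congr
    intro x _
    rw [pvP_add]
    cases pvP exclude V x <;> cases (x == v) <;> simp
  rw [hfe]
  have hvnot : v ∉ List.filter (pvP exclude (V.add v)) q := by
    intro hm
    have := (List.mem_filter.mp hm).2
    rw [pvP_add] at this
    simp at this
  have := pvFresh_add_notmem (List.filter (pvP exclude (V.add v)) q) PySem.Set.empty v hvnot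
  rw [hadd] at this
  exact this

lemma pvMem_N (exclude : Option String) (V : PySem.Set String) (q : List String) (x : String)
    (h : x ∈ pvN exclude V q) : x ∈ q ∧ pvP exclude V x = true :=
  List.mem_filter.mp (pvFresh_mem _ _ _ h).1

lemma pvLoopA_congr (succ : List (String × List String)) (exclude : Option String) (U : List String)
    (hU : ∀ v x, x ∈ pvSuccGet succ v → x ∈ U) (V₁ V₂ : PySem.Set String) (q₁ q₂ : List String)
    (hV : V₁ = V₂) (hq : q₁ = q₂) (h₁ : ∀ x ∈ q₁, x ∈ U) (h₂ : ∀ x ∈ q₂, x ∈ U) :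
    pvLoopA succ exclude U hU V₁ q₁ h₁ = pvLoopA succ exclude U hU V₂ q₂ h₂ := by
  subst hV; subst hq; rfl

lemma pvLoopB_congr (succ : List (String × List String)) (exclude : Option String) (U : List String)
    (hU : ∀ v x, x ∈ pvSuccGet succ v → x ∈ U) (V₁ V₂ : PySem.Set String) (f₁ f₂ : List String)
    (hV : V₁ = V₂) (hf : f₁ = f₂) (h₁ : ∀ x ∈ f₁, x ∈ U ∧ V₁.contains x = false)
    (h₂ : ∀ x ∈ f₂, x ∈ U ∧ V₂.contains x = false) :
    pvLoopB succ exclude U hU V₁ f₁ h₁ = pvLoopB succ exclude U hU V₂ f₂ h₂ := by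
  subst hV; subst hf; rfl

lemma pvLoopA_nil (succ : List (String × List String)) (exclude : Option String) (U : List String)
    (hU : ∀ v x, x ∈ pvSuccGet succ v → x ∈ U) (V : PySem.Set String) (h : ∀ x ∈ ([] : List String), x ∈ U) :
    pvLoopA succ exclude U hU V [] h = V := by
  rw [pvLoopA]

lemma pvLoopA_cons_skip (succ : List (String × List String)) (exclude : Option String) (U : List String)
    (hU : ∀ v x, x ∈ pvSuccGet succ v → x ∈ U) (V : PySem.Set String) (v : String) (q : List String)
    (hc : (V.contains v || (some v == exclude)) = true)
    (h : ∀ x ∈ v :: q, x ∈ U) (h' : ∀ x ∈ q, x ∈ U) :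
    pvLoopA succ exclude U hU V (v :: q) h = pvLoopA succ exclude U hU V q h' := by
  rw [pvLoopA]
  simp only [hc, dite_true]

lemma pvLoopA_cons_add (succ : List (String × List String)) (exclude : Option String) (U : List String)
    (hU : ∀ v x, x ∈ pvSuccGet succ v → x ∈ U) (V : PySem.Set String) (v : String) (q : List String)
    (hc : (V.contains v || (some v == exclude)) = false)
    (h : ∀ x ∈ v :: q, x ∈ U)
    (h' : ∀ x ∈ q ++ (pvSuccGet succ v).filter (fun w => !(some w == exclude)), x ∈ U) :
    pvLoopA succ exclude U hU V (v :: q) h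
      = pvLoopA succ exclude U hU (V.add v) (q ++ (pvSuccGet succ v).filter (fun w => !(some w == exclude))) h' := by
  rw [pvLoopA]
  simp only [hc, Bool.false_eq_true, dite_false]

lemma pvLoopB_nil (succ : List (String × List String)) (exclude : Option String) (U : List String)
    (hU : ∀ v x, x ∈ pvSuccGet succ v → x ∈ U) (V : PySem.Set String)
    (h : ∀ x ∈ ([] : List String), x ∈ U ∧ V.contains x = false) :
    pvLoopB succ exclude U hU V [] h = V := by
  rw [pvLoopB]

lemma pvLoopB_cons (succ : List (String × List String)) (exclude : Option String) (U : List String)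
    (hU : ∀ v x, x ∈ pvSuccGet succ v → x ∈ U) (V : PySem.Set String) (v : String) (rest : List String)
    (h : ∀ x ∈ v :: rest, x ∈ U ∧ V.contains x = false)
    (h' : ∀ x ∈ PySem.List.dedup ((v :: rest).flatMap (fun u => (pvSuccGet succ u).filter
        (fun w => !(some w == exclude) && !(PySem.Set.update V (v :: rest)).contains w))),
      x ∈ U ∧ (PySem.Set.update V (v :: rest)).contains x = false) :
    pvLoopB succ exclude U hU V (v :: rest) h
      = pvLoopB succ exclude U hU (PySem.Set.update V (v :: rest))
          (PySem.List.dedup ((v :: rest).flatMap (fun u => (pvSuccGet succ u).filter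
            (fun w => !(some w == exclude) && !(PySem.Set.update V (v :: rest)).contains w)))) h' := by
  rw [pvLoopB]

-- B's next frontier is exactly the canonical new nodes of the concatenated successor lists
lemma pvNext_eq (succ : List (String × List String)) (exclude : Option String)
    (V' : PySem.Set String) (L : List String) :
    PySem.List.dedup (L.flatMap (fun u => (pvSuccGet succ u).filter
        (fun w => !(some w == exclude) && !V'.contains w)))
      = pvN exclude V' (pvChain succ exclude L) := by
  rw [pvDedup_eq_fresh]
  unfold pvN pvChain
  rw [List.filter_flatMap]
  congr 1
  refine congrArg (fun f => List.flatMap f L) (funext fun u => ?_)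
  rw [List.filter_filter]
  show (pvSuccGet succ u).filter (pvP exclude V') = _
  apply List.filter_congr
  intro w _
  show pvP exclude V' w = (pvP exclude V' w && !(some w == exclude))
  unfold pvP
  cases (some w == exclude) <;> cases V'.contains w <;> simp

-- processing the queue prefix q adds exactly pvN's nodes and appends their filtered successors
lemma pvLoopA_collapse (succ : List (String × List String)) (exclude : Option String) (U : List String)
    (hU : ∀ v x, x ∈ pvSuccGet succ v → x ∈ U) (q : List String) :
    ∀ (r : List String) (V : PySem.Set String)
      (hq : ∀ x ∈ q ++ r, x ∈ U)
      (hq' : ∀ x ∈ r ++ pvChain succ exclude (pvN exclude V q), x ∈ U),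
      pvLoopA succ exclude U hU V (q ++ r) hq
        = pvLoopA succ exclude U hU (V.update (pvN exclude V q))
            (r ++ pvChain succ exclude (pvN exclude V q)) hq' := by
  induction q with
  | nil =>
    intro r V hq hq'
    apply pvLoopA_congr
    · rfl
    · show r = r ++ pvChain succ exclude []
      simp [pvChain]
  | cons v q ih =>
    intro r V hq hq'
    cases hp : pvP exclude V v
    · -- skipped node
      have hc : (V.contains v || (some v == exclude)) = true := by
        unfold pvP at hp
        cases h1 : (some v == exclude) <;> cases h2 : V.contains v <;>
          rw [h1, h2] at hp <;> simp_all
      have e1 : pvLoopA succ exclude U hU V ((v :: q) ++ r) hq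
          = pvLoopA succ exclude U hU V (q ++ r)
              (fun x hx => hq x (List.mem_cons_of_mem _ hx)) :=
        pvLoopA_cons_skip succ exclude U hU V v (q ++ r) hc _ _
      rw [e1]
      rw [ih r V (fun x hx => hq x (List.mem_cons_of_mem _ hx))
        (by rw [pvN_cons_skip exclude V v q hp] at hq'; exact hq')]
      apply pvLoopA_congr
      · rw [pvN_cons_skip exclude V v q hp]
      · rw [pvN_cons_skip exclude V v q hp]
    · -- added node
      have hc : (V.contains v || (some v == exclude)) = false := by
        unfold pvP at hp
        cases h1 : (some v == exclude) <;> cases h2 : V.contains v <;>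
          rw [h1, h2] at hp <;> simp_all
      have hCv : ∀ x ∈ (q ++ r) ++ (pvSuccGet succ v).filter (fun w => !(some w == exclude)), x ∈ U := by
        intro x hx
        rcases List.mem_append.mp hx with h1 | h2
        · exact hq x (List.mem_cons_of_mem _ h1)
        · exact hU v x (List.mem_of_mem_filter h2)
      have e1 : pvLoopA succ exclude U hU V ((v :: q) ++ r) hq
          = pvLoopA succ exclude U hU (V.add v)
              ((q ++ r) ++ (pvSuccGet succ v).filter (fun w => !(some w == exclude))) hCv :=
        pvLoopA_cons_add succ exclude U hU V v (q ++ r) hc _ _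
      rw [e1]
      have hCv2 : ∀ x ∈ q ++ (r ++ (pvSuccGet succ v).filter (fun w => !(some w == exclude))), x ∈ U := by
        rw [← List.append_assoc]; exact hCv
      have e2 : pvLoopA succ exclude U hU (V.add v)
            ((q ++ r) ++ (pvSuccGet succ v).filter (fun w => !(some w == exclude))) hCv
          = pvLoopA succ exclude U hU (V.add v)
              (q ++ (r ++ (pvSuccGet succ v).filter (fun w => !(some w == exclude)))) hCv2 :=
        pvLoopA_congr succ exclude U hU _ _ _ _ rfl (List.append_assoc _ _ _) _ _
      rw [e2]
      rw [ih (r ++ (pvSuccGet succ v).filter (fun w => !(some w == exclude))) (V.add v) hCv2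
        (by
          intro x hx
          rcases List.mem_append.mp hx with h1 | h2
          · rcases List.mem_append.mp h1 with h3 | h4
            · exact hq' x (List.mem_append.mpr (Or.inl h3))
            · exact hU v x (List.mem_of_mem_filter h4)
          · rcases List.mem_flatMap.mp h2 with ⟨u, _, hxu⟩
            exact hU u x (List.mem_of_mem_filter hxu))]
      apply pvLoopA_congr
      · rw [pvN_cons_add exclude V v q hp]
        rfl
      · rw [pvN_cons_add exclude V v q hp]
        show r ++ (pvSuccGet succ v).filter (fun w => !(some w == exclude))
            ++ pvChain succ exclude (pvN exclude (V.add v) q)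
          = r ++ pvChain succ exclude (v :: pvN exclude (V.add v) q)
        unfold pvChain
        rw [List.flatMap_cons, List.append_assoc]

-- a queue with no new nodes only drains
lemma pvLoopA_drain (succ : List (String × List String)) (exclude : Option String) (U : List String)
    (hU : ∀ v x, x ∈ pvSuccGet succ v → x ∈ U) (q : List String) (V : PySem.Set String)
    (hq : ∀ x ∈ q, x ∈ U) (hF : pvN exclude V q = []) :
    pvLoopA succ exclude U hU V q hq = V := by
  have e0 : pvLoopA succ exclude U hU V q hq
      = pvLoopA succ exclude U hU V (q ++ []) (by simpa using hq) :=
    pvLoopA_congr succ exclude U hU V V q (q ++ []) rfl (List.append_nil q).symm _ _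
  rw [e0, pvLoopA_collapse succ exclude U hU q [] V _ (by
    intro x hx
    rw [hF] at hx
    simp [pvChain] at hx)]
  have e1 : pvLoopA succ exclude U hU (V.update (pvN exclude V q))
        ([] ++ pvChain succ exclude (pvN exclude V q)) (by
          intro x hx
          rw [hF] at hx
          simp [pvChain] at hx)
      = pvLoopA succ exclude U hU V [] (fun x hx => absurd hx (List.not_mem_nil)) := by
    apply pvLoopA_congr
    · rw [hF]; rfl
    · rw [hF]; rfl
  rw [e1, pvLoopA_nil]

lemma pvMain (succ : List (String × List String)) (exclude : Option String) (U : List String)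
    (hU : ∀ v x, x ∈ pvSuccGet succ v → x ∈ U) :
    ∀ (n : Nat) (V : PySem.Set String) (q : List String)
      (hq : ∀ x ∈ q, x ∈ U)
      (hf : ∀ x ∈ pvN exclude V q, x ∈ U ∧ V.contains x = false),
      (U.filter (fun x => !V.contains x)).length ≤ n →
      pvLoopA succ exclude U hU V q hq = pvLoopB succ exclude U hU V (pvN exclude V q) hf := by
  intro n
  induction n with
  | zero =>
    intro V q hq hf hm
    by_cases hF : pvN exclude V q = []
    · rw [pvLoopA_drain succ exclude U hU q V hq hF,
        pvLoopB_congr succ exclude U hU V V _ ([] : List String) rfl hF hf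
          (fun x hx => absurd hx (List.not_mem_nil)),
        pvLoopB_nil]
    · exfalso
      rcases List.exists_mem_of_ne_nil _ hF with ⟨v, hv⟩
      rcases pvMem_N _ _ _ _ hv with ⟨hvq, hvp⟩
      have hvc : V.contains v = false := by
        unfold pvP at hvp
        cases hc : V.contains v
        · rfl
        · rw [hc] at hvp; simp at hvp
      have hmem : v ∈ U.filter (fun x => !V.contains x) :=
        List.mem_filter.mpr ⟨hq v hvq, by rw [hvc]; rfl⟩
      have := List.length_pos_of_mem hmem
      omega
  | succ n ih =>
    intro V q hq hf hm
    by_cases hF : pvN exclude V q = []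
    · rw [pvLoopA_drain succ exclude U hU q V hq hF,
        pvLoopB_congr succ exclude U hU V V _ ([] : List String) rfl hF hf
          (fun x hx => absurd hx (List.not_mem_nil)),
        pvLoopB_nil]
    · rcases List.exists_cons_of_ne_nil hF with ⟨v, rest, hFe⟩
      -- invariants of the current frontier F = pvN exclude V q
      have hFU : ∀ x ∈ pvN exclude V q, x ∈ U := fun x hx => hq x (pvMem_N _ _ _ _ hx).1
      have hFnc : ∀ x ∈ pvN exclude V q, V.contains x = false := by
        intro x hx
        have hxp := (pvMem_N _ _ _ _ hx).2
        unfold pvP at hxp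
        cases hc : V.contains x
        · rfl
        · rw [hc] at hxp; simp at hxp
      have hchainU : ∀ x ∈ pvChain succ exclude (pvN exclude V q), x ∈ U := by
        intro x hx
        rcases List.mem_flatMap.mp hx with ⟨u, _, hxu⟩
        exact hU u x (List.mem_of_mem_filter hxu)
      -- step 1: A collapses one full level
      have e0 : pvLoopA succ exclude U hU V q hq
          = pvLoopA succ exclude U hU V (q ++ []) (by simpa using hq) :=
        pvLoopA_congr succ exclude U hU V V q (q ++ []) rfl (List.append_nil q).symm _ _
      rw [e0, pvLoopA_collapse succ exclude U hU q [] V _ (by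
        intro x hx
        rcases List.mem_append.mp hx with h0 | h0
        · cases h0
        · exact hchainU x h0)]
      have e4 : pvLoopA succ exclude U hU (V.update (pvN exclude V q))
            ([] ++ pvChain succ exclude (pvN exclude V q)) (by
              intro x hx
              rcases List.mem_append.mp hx with h0 | h0
              · cases h0
              · exact hchainU x h0)
          = pvLoopA succ exclude U hU (V.update (pvN exclude V q))
              (pvChain succ exclude (pvN exclude V q)) hchainU :=
        pvLoopA_congr succ exclude U hU _ _ _ _ rfl (List.nil_append _) _ _
      rw [e4]
      -- step 2: the measure strictly decreased
      have hmono : ∀ x, (!(V.update (pvN exclude V q)).contains x) = true → (!V.contains x) = true := by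
        intro x hx
        cases hcx : V.contains x
        · rfl
        · exfalso
          have hmem : x ∈ V.update (pvN exclude V q) :=
            (pvMem_update _ _ _).mpr (Or.inl ((pvContains_iff _ _).mp hcx))
          rw [(pvContains_iff _ _).mpr hmem] at hx
          simp at hx
      have hvF : v ∈ pvN exclude V q := hFe ▸ List.mem_cons_self
      have hlt : (U.filter (fun x => !(V.update (pvN exclude V q)).contains x)).length
          < (U.filter (fun x => !V.contains x)).length := by
        refine pvFilterLenLt _ _ U hmono v (hFU v hvF) ?_ ?_
        · rw [hFnc v hvF]; rfl
        · have hmem : v ∈ V.update (pvN exclude V q) := (pvMem_update _ _ _).mpr (Or.inr hvF)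
          rw [(pvContains_iff _ _).mpr hmem]; rfl
      -- step 3: apply the induction hypothesis at the absorbed state
      have hchain_hf : ∀ x ∈ pvN exclude (V.update (pvN exclude V q)) (pvChain succ exclude (pvN exclude V q)),
          x ∈ U ∧ (V.update (pvN exclude V q)).contains x = false := by
        intro x hx
        rcases pvMem_N _ _ _ _ hx with ⟨hxc, hxp⟩
        refine ⟨hchainU x hxc, ?_⟩
        unfold pvP at hxp
        cases hc : (V.update (pvN exclude V q)).contains x
        · rfl
        · rw [hc] at hxp; simp at hxp
      rw [ih (V.update (pvN exclude V q)) (pvChain succ exclude (pvN exclude V q)) hchainU hchain_hf (by omega)]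
      -- step 4: fold B's first iteration back
      have hfF : ∀ x ∈ (v :: rest), x ∈ U ∧ V.contains x = false := by
        rw [← hFe]
        exact fun x hx => ⟨hFU x hx, hFnc x hx⟩
      have e5 : pvLoopB succ exclude U hU V (pvN exclude V q) hf
          = pvLoopB succ exclude U hU V (v :: rest) hfF :=
        pvLoopB_congr succ exclude U hU V V _ _ rfl hFe _ _
      have hf3 : ∀ x ∈ PySem.List.dedup ((v :: rest).flatMap (fun u => (pvSuccGet succ u).filter
            (fun w => !(some w == exclude) && !(PySem.Set.update V (v :: rest)).contains w))),
          x ∈ U ∧ (PySem.Set.update V (v :: rest)).contains x = false := by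
        intro x hx
        rw [pvNext_eq] at hx
        rw [← hFe] at hx ⊢
        exact hchain_hf x hx
      have e6 : pvLoopB succ exclude U hU V (v :: rest) hfF
          = pvLoopB succ exclude U hU (PySem.Set.update V (v :: rest))
              (PySem.List.dedup ((v :: rest).flatMap (fun u => (pvSuccGet succ u).filter
                (fun w => !(some w == exclude) && !(PySem.Set.update V (v :: rest)).contains w)))) hf3 :=
        pvLoopB_cons succ exclude U hU V v rest _ _
      have e7 : pvLoopB succ exclude U hU (PySem.Set.update V (v :: rest))
            (PySem.List.dedup ((v :: rest).flatMap (fun u => (pvSuccGet succ u).filter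
              (fun w => !(some w == exclude) && !(PySem.Set.update V (v :: rest)).contains w)))) hf3
          = pvLoopB succ exclude U hU (V.update (pvN exclude V q))
              (pvN exclude (V.update (pvN exclude V q)) (pvChain succ exclude (pvN exclude V q))) hchain_hf := by
        apply pvLoopB_congr
        · rw [hFe]
        · rw [pvNext_eq, ← hFe]
      rw [e5, e6, e7]

-- ===== VERDICT (by name: the statement is the Claim_ definition above) =====
theorem bfs_reachable_py_spec : Claim_equal_bfs_reachable_py := by
  unfold Claim_equal_bfs_reachable_py
  intro start succ exclude _
  unfold Spec_bfs_reachable_py bfs_reachable_py bfs_reachable_py_alt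
  have hN : pvN exclude PySem.Set.empty [start] = (if some start == exclude then [] else [start]) := by
    cases h : (some start == exclude)
    · have hp : pvP exclude PySem.Set.empty start = true := by
        unfold pvP
        rw [h]
        rfl
      simp only [Bool.false_eq_true, if_false]
      unfold pvN
      rw [List.filter_cons, hp]
      rfl
    · have hp : pvP exclude PySem.Set.empty start = false := by
        unfold pvP
        rw [h]
        rfl
      rw [if_pos rfl]
      unfold pvN
      rw [List.filter_cons, hp]
      rfl
  rw [pvMain succ exclude (pvU start succ) _
      ((pvU start succ).filter (fun x => !(PySem.Set.empty : PySem.Set String).contains x)).length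
      PySem.Set.empty [start] _
      (by
        intro x hx
        rcases pvMem_N _ _ _ _ hx with ⟨hxq, _⟩
        have hxs : x = start := by simpa using hxq
        subst hxs
        exact ⟨List.mem_cons_self, rfl⟩)
      le_rfl]
  apply pvLoopB_congr
  · rfl
  · exact hN
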